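-- pv_equiv track=rewrite | github.com/erumtw/oods-in-practice | 9_sort/exercise/ch9_3.py | whatDROME
-- ===== SOURCE A (Python) =====
-- def whatDROME(arr):
--     case = 0
--     descending = False
--     ascending = False
--     duplicate = False
--
--     for i in range(len(arr)-1):
--         if arr[i] == arr[i+1]:
--             duplicate = True
--             if i == len(arr)-2:
--                 case = 4
--
--         if arr[i] < arr[i+1]:
--             ascending = True
--             if i == len(arr)-2:
--                 case = 0
--
--         if arr[i] > arr[i+1]:
--             descending = True
--             if i == len(arr)-2:
--                 case = 2
--
--     if duplicate and ascending:
--         case = 1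
--     if duplicate and descending:
--         case = 3
--     if descending and ascending:
--         case = 5
--
--     return case
-- ===== SOURCE B (Python) =====
-- def whatDROME(arr):
--     # Sort-based classification: no scan of adjacent pairs.
--     # arr has an ascent  iff it is not non-increasing, i.e. arr != sorted(arr, reverse=True);
--     # arr has a descent  iff it is not non-decreasing, i.e. arr != sorted(arr).
--     asc = arr != sorted(arr, reverse=True)
--     desc = arr != sorted(arr)
--     if asc and desc:
--         return 5
--     # arr is monotone here, so any repeated value occurs adjacently:
--     # an adjacent duplicate exists iff the values are not all distinct.
--     dup = len(set(arr)) != len(arr)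
--     if dup and desc:
--         return 3
--     if dup and asc:
--         return 1
--     if asc:
--         return 0
--     if desc:
--         return 2
--     if dup:
--         return 4
--     return 0
-- ===== Notes on version B (the rewrite author's own statement) =====
-- stated objective: alternative
-- what changed: B classifies by comparing arr against its sorted ascending/descending copies (monotonicity via sorting, no adjacent-pair scan) and detects duplicates by set cardinality, which is sound because when the sort comparisons do not already decide the answer the array is monotone, so any repeated value is adjacent; A instead scans adjacent pairs maintaining flags plus a redundant last-pair case.
import Mathlib
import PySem

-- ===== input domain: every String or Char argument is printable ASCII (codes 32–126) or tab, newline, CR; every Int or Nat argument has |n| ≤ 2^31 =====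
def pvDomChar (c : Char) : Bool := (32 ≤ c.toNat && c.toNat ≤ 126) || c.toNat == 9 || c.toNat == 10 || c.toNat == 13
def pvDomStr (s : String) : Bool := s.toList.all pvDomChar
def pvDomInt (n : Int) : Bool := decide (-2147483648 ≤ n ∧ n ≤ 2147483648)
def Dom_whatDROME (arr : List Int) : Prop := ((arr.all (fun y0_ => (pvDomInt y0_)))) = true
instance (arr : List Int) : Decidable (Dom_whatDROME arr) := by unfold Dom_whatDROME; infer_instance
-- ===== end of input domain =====

-- B replaces A's adjacent-pair scan by sort-comparisons (monotonicity) and a set-cardinality duplicate test (objective: alternative).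

-- ===== PORT A =====
-- loop body over state (case, descending, ascending, duplicate); the loop's indices are always in range, so pyGetD's default 0 is never used
def whatDROME_body (arr : List Int) (st : Int × Bool × Bool × Bool) (i : Int) :
    Int × Bool × Bool × Bool :=
  let n : Int := PySem.List.len arr
  let ai := PySem.List.pyGetD arr i 0
  let ai1 := PySem.List.pyGetD arr (i + 1) 0
  let case0 := st.1
  let descending := st.2.1
  let ascending := st.2.2.1
  let duplicate := st.2.2.2
  let duplicate := if ai = ai1 then true else duplicate
  let case1 := if ai = ai1 ∧ i = n - 2 then 4 else case0
  let ascending := if ai < ai1 then true else ascending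
  let case2 := if ai < ai1 ∧ i = n - 2 then 0 else case1
  let descending := if ai > ai1 then true else descending
  let case3 := if ai > ai1 ∧ i = n - 2 then 2 else case2
  (case3, descending, ascending, duplicate)

def whatDROME (arr : List Int) : Int :=
  let st := (PySem.List.pyRange 0 (PySem.List.len arr - 1) 1).foldl (whatDROME_body arr)
      (0, false, false, false)
  let case0 := st.1
  let descending := st.2.1
  let ascending := st.2.2.1
  let duplicate := st.2.2.2
  let case1 := if duplicate ∧ ascending then 1 else case0
  let case2 := if duplicate ∧ descending then 3 else case1
  let case3 := if descending ∧ ascending then 5 else case2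
  case3

-- ===== PORT B =====
def whatDROME_alt (arr : List Int) : Int :=
  let asc := arr ≠ PySem.List.sorted arr (fun x => x) true
  let desc := arr ≠ PySem.List.sorted arr (fun x => x) false
  if asc ∧ desc then 5
  else
    let dup := PySem.Set.len (PySem.Set.ofList arr) ≠ PySem.List.len arr
    if dup ∧ desc then 3
    else if dup ∧ asc then 1
    else if asc then 0
    else if desc then 2
    else if dup then 4
    else 0

-- ===== PRECONDITION & SPEC =====
def Spec_whatDROME (arr : List Int) (out : Int) : Prop := out = whatDROME_alt arr
instance (arr : List Int) (out : Int) : Decidable (Spec_whatDROME arr out) := by unfold Spec_whatDROME; infer_instance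

-- ===== CLAIM (what is proved, stated in full; the proofs are below) =====
def Claim_equal_whatDROME : Prop := ∀ (arr : List Int), Dom_whatDROME arr → Spec_whatDROME arr (whatDROME arr)

-- ===== LEMMAS AND PROOFS =====

-- the case value A records when the last iteration processes the pair p
def pvCat (p : Int × Int) : Int := if p.1 = p.2 then 4 else if p.1 < p.2 then 0 else 2

theorem pyGetD_cons_succ (x : Int) (xs : List Int) (i : Int) (h : 0 ≤ i) :
    PySem.List.pyGetD (x::xs) (i+1) 0 = PySem.List.pyGetD xs i 0 := by
  simp only [PySem.List.pyGetD, PySem.List.pyGet?, PySem.List.pyIdx?]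
  rw [if_pos h, if_pos (by omega : (0:Int) ≤ i + 1)]
  by_cases hlt : i < (xs.length : Int)
  · rw [if_pos hlt, if_pos (by simp; omega)]
    simp only [Option.bind_some]
    have : (i+1).toNat = i.toNat + 1 := by omega
    simp [this]
  · rw [if_neg hlt, if_neg (by simp; omega)]
    simp

theorem body_shift (x : Int) (rest : List Int) (st : Int × Bool × Bool × Bool) (i : Int)
    (h : 0 ≤ i) :
    whatDROME_body (x::rest) st (i+1) = whatDROME_body rest st i := by
  simp only [whatDROME_body, pyGetD_cons_succ x rest i h,
    pyGetD_cons_succ x rest (i+1) (by omega)]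
  have hco : (i + 1 = PySem.List.len (x :: rest) - 2) ↔ (i = PySem.List.len rest - 2) := by
    simp [PySem.List.len]; omega
  simp only [hco]

theorem fold_shift (x : Int) (rest : List Int) (st : Int × Bool × Bool × Bool) :
    (PySem.List.pyRange 1 (PySem.List.len (x::rest) - 1) 1).foldl (whatDROME_body (x::rest)) st
    = (PySem.List.pyRange 0 (PySem.List.len rest - 1) 1).foldl (whatDROME_body rest) st := by
  rw [PySem.List.pyRange_one, PySem.List.pyRange_one, List.foldl_map, List.foldl_map]
  have hlen : ((PySem.List.len (x::rest) - 1 - 1).toNat) = ((PySem.List.len rest - 1 - 0).toNat) := by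
    simp [PySem.List.len]
  rw [hlen]
  have hfun : (fun (st : Int × Bool × Bool × Bool) (k : Nat) =>
        whatDROME_body (x::rest) st (1 + (k : Int)))
      = fun (st : Int × Bool × Bool × Bool) (k : Nat) =>
        whatDROME_body rest st (0 + (k : Int)) := by
    funext st k
    rw [add_comm, body_shift x rest st k (Int.natCast_nonneg k), zero_add]
  rw [hfun]

-- A's loop computes the three adjacent-pair flags and, as its case, the category of the LAST adjacent pair
theorem loop_char_gen (arr : List Int) : ∀ (st : Int × Bool × Bool × Bool),
    (PySem.List.pyRange 0 (PySem.List.len arr - 1) 1).foldl (whatDROME_body arr) st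
    = (((arr.zip arr.tail).getLast?.map pvCat).getD st.1,
       st.2.1 || (arr.zip arr.tail).any (fun p => p.1 > p.2),
       st.2.2.1 || (arr.zip arr.tail).any (fun p => p.1 < p.2),
       st.2.2.2 || (arr.zip arr.tail).any (fun p => p.1 == p.2)) := by
  induction arr with
  | nil =>
    intro st
    rw [PySem.List.pyRange_one_eq_nil (by simp [PySem.List.len])]
    simp
  | cons x rest ih =>
    intro st
    cases rest with
    | nil =>
      rw [PySem.List.pyRange_one_eq_nil (by simp [PySem.List.len])]
      simp
    | cons y t =>
      rw [PySem.List.pyRange_one_cons (by simp [PySem.List.len]), List.foldl_cons]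
      rw [show (0:Int) + 1 = 1 by ring]
      rw [fold_shift, ih]
      have hnn : (0:Int) ≤ (t.length : Int) + 1 := by omega
      have hx : PySem.List.pyGetD (x::y::t) 0 0 = x := by
        simp [PySem.List.pyGetD, PySem.List.pyGet?, PySem.List.pyIdx?, hnn]
      have hy : PySem.List.pyGetD (x::y::t) (0+1) 0 = y := by
        rw [pyGetD_cons_succ x (y::t) 0 (le_refl 0)]
        simp [PySem.List.pyGetD, PySem.List.pyGet?, PySem.List.pyIdx?]
      simp only [whatDROME_body, hx, hy]
      by_cases ht : t = []
      · subst ht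
        rcases lt_trichotomy x y with h | h | h
        · have hb : (x == y) = false := by simp; omega
          have h1 : ¬ x > y := by omega
          have h2 : x ≠ y := by omega
          simp [pvCat, h, h1, h2, hb]
        · subst h
          simp [pvCat]
        · have hb : (x == y) = false := by simp; omega
          have h1 : ¬ x < y := by omega
          have h2 : x ≠ y := by omega
          have h3 : x > y := h
          simp [pvCat, h1, h2, h3, hb]
      · obtain ⟨z, t', rfl⟩ : ∃ z t', t = z :: t' := by
          cases t with | nil => exact absurd rfl ht | cons z t' => exact ⟨z, t', rfl⟩
        have hcond : ((0 : Int) = PySem.List.len (x::y::z::t') - 2) ↔ False := by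
          simp [PySem.List.len]; omega
        simp only [List.tail_cons, List.zip_cons_cons, List.getLast?_cons_cons, List.any_cons,
          hcond, and_false, if_false, Prod.mk.injEq]
        refine ⟨trivial, ?_, ?_, ?_⟩
        · by_cases hgt : x > y <;> simp [hgt]
        · by_cases hlt : x < y <;> simp [hlt]
        · by_cases heq : x = y
          · simp [heq]
          · have hb : (x == y) = false := by simp [heq]
            simp [heq, hb]

-- bridge: "no adjacent pair satisfies f" is exactly a chain condition
theorem zip_any_eq_false_iff (f : Int → Int → Bool) (l : List Int) :
    ((l.zip l.tail).any (fun p => f p.1 p.2) = false) ↔ l.IsChain (fun a b => f a b = false) := by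
  induction l with
  | nil => simp
  | cons x t ih =>
    cases t with
    | nil => simp
    | cons y t =>
      simp only [List.tail_cons, List.zip_cons_cons, List.any_cons, Bool.or_eq_false_iff,
        List.isChain_cons_cons]
      rw [← ih]
      simp

theorem chain_and (l : List Int) (R S : Int → Int → Prop)
    (h1 : l.IsChain R) (h2 : l.IsChain S) : l.IsChain (fun a b => R a b ∧ S a b) := by
  induction l with
  | nil => simp
  | cons x t ih =>
    cases t with
    | nil => simp
    | cons y t =>
      rw [List.isChain_cons_cons] at *
      exact ⟨⟨h1.1, h2.1⟩, ih h1.2 h2.2⟩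

-- "no adjacent descent" = the list already equals its ascending sort
theorem anyGt_false_iff_sorted (arr : List Int) :
    ((arr.zip arr.tail).any (fun p => decide (p.1 > p.2)) = false)
      ↔ PySem.List.sorted arr (fun x => x) false = arr := by
  constructor
  · intro h
    apply PySem.List.sorted_eq_self_of_pairwise
    have hc := (zip_any_eq_false_iff (fun a b => decide (a > b)) arr).mp h
    have hc' : arr.IsChain (fun a b => a ≤ b) := by
      refine hc.imp ?_
      intro a b hab
      simp at hab
      omega
    exact List.isChain_iff_pairwise.mp hc'
  · intro h
    have hp : arr.Pairwise (fun a b => a ≤ b) := by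
      have := PySem.List.sorted_pairwise arr (fun x => x) (κ := Int)
      rwa [h] at this
    refine (zip_any_eq_false_iff (fun a b => decide (a > b)) arr).mpr
      ((List.isChain_iff_pairwise.mpr hp).imp ?_)
    intro a b hab
    simp
    omega

-- "no adjacent ascent" = the list already equals its descending sort
theorem anyLt_false_iff_sorted_rev (arr : List Int) :
    ((arr.zip arr.tail).any (fun p => decide (p.1 < p.2)) = false)
      ↔ PySem.List.sorted arr (fun x => x) true = arr := by
  constructor
  · intro h
    apply PySem.List.sorted_rev_eq_self_of_pairwise
    have hc := (zip_any_eq_false_iff (fun a b => decide (a < b)) arr).mp h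
    have hc' : arr.IsChain (fun a b => b ≤ a) := by
      refine hc.imp ?_
      intro a b hab
      simp at hab
      omega
    exact List.isChain_iff_pairwise.mp hc'
  · intro h
    have hp : arr.Pairwise (fun a b => b ≤ a) := by
      have := PySem.List.sorted_pairwise_rev arr (fun x => x) (κ := Int)
      rwa [h] at this
    refine (zip_any_eq_false_iff (fun a b => decide (a < b)) arr).mpr
      ((List.isChain_iff_pairwise.mpr hp).imp ?_)
    intro a b hab
    simp
    omega

-- set(arr) has full size exactly when arr has no repeated value
theorem pvSublist_ofList (xs : List Int) : (PySem.Set.ofList xs).Sublist xs := by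
  rw [PySem.Set.ofList_eq_foldl]
  suffices h : ∀ (xs acc l : List Int), acc.Sublist l →
      (xs.foldl PySem.Set.add acc).Sublist (l ++ xs) by
    simpa using h xs [] [] (List.Sublist.refl [])
  intro xs
  induction xs with
  | nil => intro acc l h; simpa using h
  | cons x t ih =>
    intro acc l h
    rw [List.foldl_cons]
    have h2 : (PySem.Set.add acc x).Sublist (l ++ [x]) := by
      by_cases hc : x ∈ acc
      · simpa [PySem.Set.add, hc] using h.trans (List.sublist_append_left l [x])
      · simpa [PySem.Set.add, hc] using h.append (List.Sublist.refl [x])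
    have := ih (PySem.Set.add acc x) (l ++ [x]) h2
    simpa using this
theorem ofList_len_iff_nodup (arr : List Int) :
    ((PySem.Set.ofList arr).length = arr.length) ↔ arr.Nodup := by
  constructor
  · intro h
    have := (pvSublist_ofList arr).eq_of_length h
    rw [← this]
    exact PySem.Set.nodup_ofList arr
  · intro h
    rw [PySem.Set.ofList_eq_self_of_nodup arr h]

-- on a monotone list, "some adjacent equal pair" is exactly "some repeated value"
theorem anyEq_false_iff_nodup_of_mono (arr : List Int)
    (hm : arr.IsChain (fun a b => a ≤ b) ∨ arr.IsChain (fun a b => b ≤ a)) :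
    ((arr.zip arr.tail).any (fun p => p.1 == p.2) = false) ↔ arr.Nodup := by
  constructor
  · intro h
    have hne := (zip_any_eq_false_iff _ arr).mp h
    rcases hm with hc | hc
    · have : arr.IsChain (fun a b => a < b) := by
        refine (chain_and arr _ _ hne hc).imp ?_
        intro a b hab
        rcases hab with ⟨h1, h2⟩
        simp at h1
        omega
      exact List.Pairwise.imp (fun h => ne_of_lt h) (List.isChain_iff_pairwise.mp this)
    · have : arr.IsChain (fun a b => b < a) := by
        refine (chain_and arr _ _ hne hc).imp ?_
        intro a b hab
        rcases hab with ⟨h1, h2⟩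
        simp at h1
        omega
      exact List.Pairwise.imp (fun h => (ne_of_lt h).symm) (List.isChain_iff_pairwise.mp this)
  · intro h
    refine (zip_any_eq_false_iff (fun a b => a == b) arr).mpr (h.isChain.imp ?_)
    intro a b hab
    simpa using hab

-- B reduced to the three adjacent-pair flags
theorem alt_eq_table (arr : List Int) :
    whatDROME_alt arr =
      (let anyLt := (arr.zip arr.tail).any (fun p => decide (p.1 < p.2))
       let anyGt := (arr.zip arr.tail).any (fun p => decide (p.1 > p.2))
       let anyEq := (arr.zip arr.tail).any (fun p => p.1 == p.2)
       if anyLt && anyGt then 5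
       else if anyEq && anyGt then 3
       else if anyEq && anyLt then 1
       else if anyLt then 0
       else if anyGt then 2
       else if anyEq then 4
       else 0) := by
  simp only [whatDROME_alt]
  have hA : (arr ≠ PySem.List.sorted arr (fun x => x) true)
      ↔ ((arr.zip arr.tail).any (fun p => decide (p.1 < p.2)) = true) := by
    rw [← Bool.not_eq_false, not_iff_comm, anyLt_false_iff_sorted_rev, not_not, eq_comm]
  have hD : (arr ≠ PySem.List.sorted arr (fun x => x) false)
      ↔ ((arr.zip arr.tail).any (fun p => decide (p.1 > p.2)) = true) := by
    rw [← Bool.not_eq_false, not_iff_comm, anyGt_false_iff_sorted, not_not, eq_comm]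
  rcases Bool.eq_false_or_eq_true ((arr.zip arr.tail).any fun p => decide (p.1 < p.2)) with ha | ha <;>
    rcases Bool.eq_false_or_eq_true ((arr.zip arr.tail).any fun p => decide (p.1 > p.2)) with hd | hd
  · -- both an ascent and a descent: B answers 5 before looking at duplicates
    simp [ha, hd, hA, hD]
  · -- only ascent: monotone increasing
    have hU := anyEq_false_iff_nodup_of_mono arr
      (Or.inl (((zip_any_eq_false_iff (fun a b => decide (a > b)) arr).mp hd).imp (by intro a b hab; simp at hab; omega)))
    rcases Bool.eq_false_or_eq_true ((arr.zip arr.tail).any fun p => p.1 == p.2) with hu | hu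
    · have hL : ¬ (PySem.Set.ofList arr).length = arr.length := by
        intro h
        rw [hU.mpr ((ofList_len_iff_nodup arr).mp h)] at hu
        exact absurd hu (by simp)
      simp [ha, hd, hu, hA, hD, hL]
    · have hL : (PySem.Set.ofList arr).length = arr.length :=
        (ofList_len_iff_nodup arr).mpr (hU.mp hu)
      simp [ha, hd, hu, hA, hD, hL]
  · -- only descent: monotone decreasing
    have hU := anyEq_false_iff_nodup_of_mono arr
      (Or.inr (((zip_any_eq_false_iff (fun a b => decide (a < b)) arr).mp ha).imp (by intro a b hab; simp at hab; omega)))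
    rcases Bool.eq_false_or_eq_true ((arr.zip arr.tail).any fun p => p.1 == p.2) with hu | hu
    · have hL : ¬ (PySem.Set.ofList arr).length = arr.length := by
        intro h
        rw [hU.mpr ((ofList_len_iff_nodup arr).mp h)] at hu
        exact absurd hu (by simp)
      simp [ha, hd, hu, hA, hD, hL]
    · have hL : (PySem.Set.ofList arr).length = arr.length :=
        (ofList_len_iff_nodup arr).mpr (hU.mp hu)
      simp [ha, hd, hu, hA, hD, hL]
  · -- neither ascent nor descent: monotone
    have hU := anyEq_false_iff_nodup_of_mono arr
      (Or.inl (((zip_any_eq_false_iff (fun a b => decide (a > b)) arr).mp hd).imp (by intro a b hab; simp at hab; omega)))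
    rcases Bool.eq_false_or_eq_true ((arr.zip arr.tail).any fun p => p.1 == p.2) with hu | hu
    · have hL : ¬ (PySem.Set.ofList arr).length = arr.length := by
        intro h
        rw [hU.mpr ((ofList_len_iff_nodup arr).mp h)] at hu
        exact absurd hu (by simp)
      simp [ha, hd, hu, hA, hD, hL]
    · have hL : (PySem.Set.ofList arr).length = arr.length :=
        (ofList_len_iff_nodup arr).mpr (hU.mp hu)
      simp [ha, hd, hu, hA, hD, hL]

-- a list whose adjacent pairs are never <, > or == has no adjacent pair at all
theorem pairs_nil_of_all_false (ps : List (Int × Int))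
    (ha : ps.any (fun p => p.1 < p.2) = false)
    (hd : ps.any (fun p => p.1 > p.2) = false)
    (hu : ps.any (fun p => p.1 == p.2) = false) : ps = [] := by
  cases ps with
  | nil => rfl
  | cons p l =>
    simp only [List.any_cons, Bool.or_eq_false_iff] at ha hd hu
    have h1 := ha.1
    have h2 := hd.1
    have h3 := hu.1
    simp at h1 h2 h3
    omega

-- ===== VERDICT (by name: the statement is the Claim_ definition above) =====
theorem whatDROME_spec : Claim_equal_whatDROME := by
  intro arr _
  unfold Spec_whatDROME whatDROME
  rw [loop_char_gen, alt_eq_table]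
  simp only [Bool.false_or]
  rcases Bool.eq_false_or_eq_true ((arr.zip arr.tail).any fun p => decide (p.1 < p.2)) with ha | ha <;>
    rcases Bool.eq_false_or_eq_true ((arr.zip arr.tail).any fun p => decide (p.1 > p.2)) with hd | hd <;>
      rcases Bool.eq_false_or_eq_true ((arr.zip arr.tail).any fun p => p.1 == p.2) with hu | hu <;>
        simp [ha, hd, hu]
  -- only ascending: the last pair must satisfy <
  case inl.inr.inr =>
    have hne : arr.zip arr.tail ≠ [] := by
      intro h; rw [h] at ha; simp at ha
    obtain ⟨p, hq⟩ := Option.ne_none_iff_exists'.mp (mt List.getLast?_eq_none_iff.mp hne)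
    have hm := List.mem_of_getLast? hq
    rw [List.any_eq_false] at hd hu
    have h1 := hd p hm
    have h2 := hu p hm
    simp at h1 h2
    have hcat : pvCat p = 0 := by unfold pvCat; rw [if_neg (by omega), if_pos (by omega)]
    simp [hq, hcat]
  -- only descending: the last pair must satisfy >
  case inr.inl.inr =>
    have hne : arr.zip arr.tail ≠ [] := by
      intro h; rw [h] at hd; simp at hd
    obtain ⟨p, hq⟩ := Option.ne_none_iff_exists'.mp (mt List.getLast?_eq_none_iff.mp hne)
    have hm := List.mem_of_getLast? hq
    rw [List.any_eq_false] at ha hu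
    have h1 := ha p hm
    have h2 := hu p hm
    simp at h1 h2
    have hcat : pvCat p = 2 := by unfold pvCat; rw [if_neg (by omega), if_neg (by omega)]
    simp [hq, hcat]
  -- only duplicate: the last pair must satisfy ==
  case inr.inr.inl =>
    have hne : arr.zip arr.tail ≠ [] := by
      intro h; rw [h] at hu; simp at hu
    obtain ⟨p, hq⟩ := Option.ne_none_iff_exists'.mp (mt List.getLast?_eq_none_iff.mp hne)
    have hm := List.mem_of_getLast? hq
    rw [List.any_eq_false] at ha hd
    have h1 := ha p hm
    have h2 := hd p hm
    simp at h1 h2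
    have hcat : pvCat p = 4 := by unfold pvCat; rw [if_pos (by omega)]
    simp [hq, hcat]
  -- no flag set: there is no adjacent pair at all
  case inr.inr.inr =>
    rw [pairs_nil_of_all_false _ ha hd hu]
    simp
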